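-- pv_equiv track=rewrite | github.com/atlegu/friidrettsstatistikk | scraper/scraper_v2.py | extract_unique_entities
-- ===== SOURCE A (Python) =====
-- def extract_unique_entities(results):
--     """Ekstraher unike utøvere, klubber og stevner fra resultater."""
--     athletes = {}
--     clubs = set()
--     meets = {}
--
--     for r in results:
--         # Utøver
--         athlete_key = (r.get('name'), r.get('birth_date'))
--         if athlete_key[0] and athlete_key not in athletes:
--             name_parts = r['name'].split()
--             athletes[athlete_key] = {
--                 'external_id': r.get('athlete_id'),
--                 'first_name': name_parts[0] if name_parts else '',
--                 'last_name': ' '.join(name_parts[1:]) if len(name_parts) > 1 else '',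
--                 'full_name': r['name'],
--                 'birth_date': r.get('birth_date'),
--                 'club': r.get('club'),
--                 'gender': r.get('gender')
--             }
--
--         # Klubb
--         if r.get('club'):
--             clubs.add(r['club'])
--
--         # Stevne
--         meet_key = (r.get('meet_name'), r.get('date'), r.get('city'))
--         if meet_key[0] and meet_key not in meets:
--             meets[meet_key] = {
--                 'name': r.get('meet_name'),
--                 'date': r.get('date'),
--                 'city': r.get('city'),
--                 'indoor': r.get('indoor', False)
--             }
--
--     return {
--         'athletes': list(athletes.values()),
--         'clubs': [{'name': c} for c in sorted(clubs)],
--         'meets': list(meets.values())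
--     }
-- ===== SOURCE B (Python) =====
-- def _athlete_item(r):
--     """Contribution of one record to the athletes map, or None."""
--     name = r.get('name')
--     if not name:
--         return None
--     parts = r['name'].split()
--     return ((name, r.get('birth_date')), {
--         'external_id': r.get('athlete_id'),
--         'first_name': parts[0] if parts else '',
--         'last_name': ' '.join(parts[1:]) if len(parts) > 1 else '',
--         'full_name': r['name'],
--         'birth_date': r.get('birth_date'),
--         'club': r.get('club'),
--         'gender': r.get('gender'),
--     })
--
--
-- def _meet_item(r):
--     """Contribution of one record to the meets map, or None."""
--     mn = r.get('meet_name')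
--     if not mn:
--         return None
--     return ((mn, r.get('date'), r.get('city')), {
--         'name': mn,
--         'date': r.get('date'),
--         'city': r.get('city'),
--         'indoor': r.get('indoor', False),
--     })
--
--
-- def _merge(xs, ys, key):
--     """First-occurrence-wins merge: xs, then the ys whose key is new."""
--     seen = {key(x) for x in xs}
--     return xs + [y for y in ys if key(y) not in seen]
--
--
-- def _gather(rs):
--     """Divide and conquer: (athlete items, clubs, meet items) of rs,
--     each deduplicated keeping the first occurrence, in order."""
--     n = len(rs)
--     if n == 0:
--         return [], [], []
--     if n == 1:
--         r = rs[0]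
--         a = _athlete_item(r)
--         c = r.get('club')
--         m = _meet_item(r)
--         return ([a] if a else []), ([c] if c else []), ([m] if m else [])
--     mid = n // 2
--     la, lc, lm = _gather(rs[:mid])
--     ra, rc, rm = _gather(rs[mid:])
--     return (_merge(la, ra, lambda p: p[0]),
--             _merge(lc, rc, lambda c: c),
--             _merge(lm, rm, lambda p: p[0]))
--
--
-- def extract_unique_entities(results):
--     """Ekstraher unike utøvere, klubber og stevner fra resultater."""
--     athletes, clubs, meets = _gather(results)
--     return {
--         'athletes': [v for _, v in athletes],
--         'clubs': [{'name': c} for c in sorted(clubs)],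
--         'meets': [v for _, v in meets],
--     }
-- ===== Notes on version B (the rewrite author's own statement) =====
-- stated objective: alternative
-- what changed: A's single left-to-right loop that mutates three dict/set accumulators is replaced by a divide-and-conquer: each record yields at most one (key, record) item per entity, halves are processed recursively, and the halves' already-deduplicated item lists are combined with a first-occurrence-wins merge; the final dict is assembled from the merged item lists.
import Mathlib
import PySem

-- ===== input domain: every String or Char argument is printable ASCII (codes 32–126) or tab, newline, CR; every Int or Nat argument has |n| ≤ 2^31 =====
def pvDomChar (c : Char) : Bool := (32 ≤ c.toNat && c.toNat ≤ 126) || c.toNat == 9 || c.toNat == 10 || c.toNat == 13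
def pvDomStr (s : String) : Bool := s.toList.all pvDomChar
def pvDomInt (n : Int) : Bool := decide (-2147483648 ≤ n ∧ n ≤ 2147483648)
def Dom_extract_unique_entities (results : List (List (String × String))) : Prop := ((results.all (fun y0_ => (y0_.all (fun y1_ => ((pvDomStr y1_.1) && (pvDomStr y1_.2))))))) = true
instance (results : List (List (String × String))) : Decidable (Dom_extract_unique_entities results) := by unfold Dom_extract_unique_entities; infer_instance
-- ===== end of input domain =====

-- B replaces A's single mutating loop over three dict/set accumulators by a divide-and-conquer:
-- per-record (key, record) items, recursion on halves, and a first-occurrence-wins merge of the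
-- halves' deduplicated item lists (objective: alternative; same observable return value).

-- shared Python-dict primitives: r.get(k) (first match) and string truthiness
def rget (r : List (String × String)) (k : String) : Option String :=
  (r.find? (fun p => p.1 == k)).map (fun p => p.2)

def truthy : Option String → Bool
  | none => false
  | some s => s != ""

-- ===== PORT A =====
-- one fused loop over a triple (athletes, clubs, meets)
def aStep (st : PySem.Dict (Option String × Option String) (List (String × String)) × PySem.Set String × PySem.Dict (Option String × Option String × Option String) (List (String × String)))
    (r : List (String × String)) :
    PySem.Dict (Option String × Option String) (List (String × String)) × PySem.Set String × PySem.Dict (Option String × Option String × Option String) (List (String × String)) :=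
  let akey := (rget r "name", rget r "birth_date")
  let athletes :=
    if truthy akey.1 && !(st.1.contains akey) then
      let nm := (rget r "name").getD ""
      let parts := PySem.Str.split₀ nm
      st.1.insert akey
        [("external_id", (rget r "athlete_id").getD ""),
         ("first_name", match parts with | p :: _ => p | [] => ""),
         ("last_name", if parts.length > 1 then PySem.Str.join " " parts.tail else ""),
         ("full_name", nm),
         ("birth_date", (rget r "birth_date").getD ""),
         ("club", (rget r "club").getD ""),
         ("gender", (rget r "gender").getD "")]
    else st.1
  let clubs :=
    if truthy (rget r "club") then PySem.Set.add st.2.1 ((rget r "club").getD "") else st.2.1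
  let mkey := (rget r "meet_name", rget r "date", rget r "city")
  let meets :=
    if truthy mkey.1 && !(st.2.2.contains mkey) then
      st.2.2.insert mkey
        [("name", (rget r "meet_name").getD ""),
         ("date", (rget r "date").getD ""),
         ("city", (rget r "city").getD ""),
         ("indoor", (rget r "indoor").getD "")]
    else st.2.2
  (athletes, clubs, meets)

def extract_unique_entities (results : List (List (String × String))) : List (String × List (List (String × String))) :=
  let fin := results.foldl aStep (PySem.Dict.empty, PySem.Set.empty, PySem.Dict.empty)
  [("athletes", fin.1.values),
   ("clubs", (PySem.List.sorted fin.2.1 (fun x => x) false).map (fun c => [("name", c)])),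
   ("meets", fin.2.2.values)]

-- ===== PORT B =====
-- _athlete_item: one record's contribution to the athletes map (None if name is falsy)
def athleteItem (r : List (String × String)) :
    Option ((Option String × Option String) × List (String × String)) :=
  if truthy (rget r "name") then
    let parts := PySem.Str.split₀ ((rget r "name").getD "")
    some ((rget r "name", rget r "birth_date"),
      [("external_id", (rget r "athlete_id").getD ""),
       ("first_name", match parts with | p :: _ => p | [] => ""),
       ("last_name", if parts.length > 1 then PySem.Str.join " " parts.tail else ""),
       ("full_name", (rget r "name").getD ""),
       ("birth_date", (rget r "birth_date").getD ""),
       ("club", (rget r "club").getD ""),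
       ("gender", (rget r "gender").getD "")])
  else none

-- _meet_item: one record's contribution to the meets map (None if meet_name is falsy)
def meetItem (r : List (String × String)) :
    Option ((Option String × Option String × Option String) × List (String × String)) :=
  if truthy (rget r "meet_name") then
    some ((rget r "meet_name", rget r "date", rget r "city"),
      [("name", (rget r "meet_name").getD ""),
       ("date", (rget r "date").getD ""),
       ("city", (rget r "city").getD ""),
       ("indoor", (rget r "indoor").getD "")])
  else none

-- _merge: first-occurrence-wins merge (the Python 'seen' set is a key-membership test on xs)
def mergeBy {α κ : Type} [BEq κ] (key : α → κ) (xs ys : List α) : List α :=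
  xs ++ ys.filter (fun y => !(xs.any (fun x => key x == key y)))

-- _gather: divide and conquer over results
def gather : List (List (String × String)) →
    (List ((Option String × Option String) × List (String × String)) × List String ×
     List ((Option String × Option String × Option String) × List (String × String)))
  | [] => ([], [], [])
  | [r] =>
      ((athleteItem r).toList,
       (if truthy (rget r "club") then [(rget r "club").getD ""] else []),
       (meetItem r).toList)
  | r₁ :: r₂ :: rest =>
      let l := r₁ :: r₂ :: rest
      let mid := l.length / 2
      let L := gather (l.take mid)
      let R := gather (l.drop mid)
      (mergeBy (fun p => p.1) L.1 R.1,
       mergeBy (fun c => c) L.2.1 R.2.1,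
       mergeBy (fun p => p.1) L.2.2 R.2.2)
termination_by l => l.length
decreasing_by
  · simp [List.length_take]; omega
  · simp; omega

def extract_unique_entities_alt (results : List (List (String × String))) : List (String × List (List (String × String))) :=
  let t := gather results
  [("athletes", t.1.map (fun p => p.2)),
   ("clubs", (PySem.List.sorted t.2.1 (fun x => x) false).map (fun c => [("name", c)])),
   ("meets", t.2.2.map (fun p => p.2))]

-- ===== PRECONDITION & SPEC =====
-- Pre_ excludes records whose triggering key ('name' / 'meet_name') is truthy while one of the
-- other fields the built record copies is absent: there Python A's returned record contains the
-- non-string values None (and the bool False for the missing 'indoor' default), values outside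
-- the declared str-valued result type; Python B returns the identical dict on those inputs.
def Pre_extract_unique_entities (results : List (List (String × String))) : Prop :=
  (results.all (fun r =>
    (if truthy (rget r "name") then
      (rget r "athlete_id").isSome && (rget r "birth_date").isSome &&
      (rget r "club").isSome && (rget r "gender").isSome
     else true) &&
    (if truthy (rget r "meet_name") then
      (rget r "date").isSome && (rget r "city").isSome && (rget r "indoor").isSome
     else true))) = true
instance (results : List (List (String × String))) : Decidable (Pre_extract_unique_entities results) := by unfold Pre_extract_unique_entities; infer_instance

def pvWitness_extract_unique_entities : (List (List (String × String))) :=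
  [[("name", "Ola Nordmann"), ("birth_date", "2000-01-01"), ("athlete_id", "7"),
    ("club", "IL Tempo"), ("gender", "M"), ("meet_name", "NM"), ("date", "2024-06-01"),
    ("city", "Oslo"), ("indoor", "")]]

def Spec_extract_unique_entities (results : List (List (String × String))) (out : List (String × List (List (String × String)))) : Prop := out = extract_unique_entities_alt results
instance (results : List (List (String × String))) (out : List (String × List (List (String × String)))) : Decidable (Spec_extract_unique_entities results out) := by unfold Spec_extract_unique_entities; infer_instance

-- ===== CLAIM (what is proved, stated in full; the proofs are below) =====
def Claim_equal_extract_unique_entities : Prop := ∀ (results : List (List (String × String))), Dom_extract_unique_entities results → Pre_extract_unique_entities results → Spec_extract_unique_entities results (extract_unique_entities results)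

-- ===== LEMMAS AND PROOFS =====

-- the canonical first-occurrence-wins accumulator step both sides are reduced to
def ded {α κ : Type} [BEq κ] (key : α → κ) (acc : List α) (a : α) : List α :=
  if acc.any (fun b => key b == key a) then acc else acc ++ [a]

-- folding ded from any accumulator is a merge with the from-scratch fold
theorem foldl_ded {α κ : Type} [BEq κ] [LawfulBEq κ] (key : α → κ) (v acc : List α) :
    v.foldl (ded key) acc = mergeBy key acc (v.foldl (ded key) []) := by
  induction v generalizing acc with
  | nil => simp [mergeBy]
  | cons p v ih =>
    simp only [List.foldl]
    rw [ih (ded key acc p), ih (ded key [] p)]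
    have h0 : ded key [] p = [p] := by simp [ded]
    rw [h0]
    simp only [mergeBy, List.any_cons, List.any_nil, Bool.or_false]
    by_cases h : acc.any (fun b => key b == key p) = true
    · have hd : ded key acc p = acc := by simp [ded, h]
      have hp : (!(acc.any (fun x => key x == key p))) = false := by simp [h]
      rw [hd]
      simp only [List.filter_append, List.filter_cons, List.filter_nil, hp,
        Bool.false_eq_true, if_false, List.filter_filter, List.nil_append]
      congr 1
      apply List.filter_congr
      intro y _
      by_cases hk : (key p == key y) = true
      · have hpy : key p = key y := by simpa using hk
        have : acc.any (fun x => key x == key y) = true := by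
          rcases List.any_eq_true.mp h with ⟨b, hb, hbe⟩
          have hbp : key b = key p := by simpa using hbe
          exact List.any_eq_true.mpr ⟨b, hb, by simp [hbp, hpy]⟩
        simp [this, hk]
      · simp [hk]
    · have hd : ded key acc p = acc ++ [p] := by simp [ded, h]
      have hp : (!(acc.any (fun x => key x == key p))) = true := by simp_all
      rw [hd]
      simp only [List.filter_cons, hp, if_true,
        List.filter_filter, List.append_assoc, List.singleton_append]
      congr 2
      apply List.filter_congr
      intro y _
      simp only [List.any_append, List.any_cons, List.any_nil, Bool.or_false]
      cases hk : (key p == key y) <;> cases ha : acc.any (fun x => key x == key y) <;> simp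

-- deduplicating a concatenation = merging the two deduplications
theorem ded_append {α κ : Type} [BEq κ] [LawfulBEq κ] (key : α → κ) (u v : List α) :
    ((u ++ v).foldl (ded key) []) = mergeBy key (u.foldl (ded key) []) (v.foldl (ded key) []) := by
  rw [List.foldl_append]
  exact foldl_ded key v (u.foldl (ded key) [])

-- club contribution of one record (inline in gather's base case)
def clubContrib (r : List (String × String)) : Option String :=
  if truthy (rget r "club") then some ((rget r "club").getD "") else none

-- A's three accumulator updates, isolated
def aAthStep (d : PySem.Dict (Option String × Option String) (List (String × String)))
    (r : List (String × String)) : PySem.Dict (Option String × Option String) (List (String × String)) :=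
  let akey := (rget r "name", rget r "birth_date")
  if truthy akey.1 && !(d.contains akey) then
    d.insert akey ((athleteItem r).getD ((none, none), [])).2
  else d

def cStep (c : PySem.Set String) (r : List (String × String)) : PySem.Set String :=
  if truthy (rget r "club") then PySem.Set.add c ((rget r "club").getD "") else c

def aMeetStep (d : PySem.Dict (Option String × Option String × Option String) (List (String × String)))
    (r : List (String × String)) : PySem.Dict (Option String × Option String × Option String) (List (String × String)) :=
  let mkey := (rget r "meet_name", rget r "date", rget r "city")
  if truthy mkey.1 && !(d.contains mkey) then
    d.insert mkey ((meetItem r).getD ((none, none, none), [])).2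
  else d

theorem aStep_eq (st : PySem.Dict (Option String × Option String) (List (String × String)) × PySem.Set String × PySem.Dict (Option String × Option String × Option String) (List (String × String)))
    (r : List (String × String)) :
    aStep st r = (aAthStep st.1 r, cStep st.2.1 r, aMeetStep st.2.2 r) := by
  by_cases h1 : truthy (rget r "name") <;>
    by_cases h2 : truthy (rget r "meet_name") <;>
      simp [aStep, aAthStep, cStep, aMeetStep, athleteItem, meetItem, h1, h2]

theorem foldA_eq (results : List (List (String × String)))
    (a : PySem.Dict (Option String × Option String) (List (String × String)))
    (c : PySem.Set String)
    (m : PySem.Dict (Option String × Option String × Option String) (List (String × String))) :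
    results.foldl aStep (a, c, m) =
      (results.foldl aAthStep a, results.foldl cStep c, results.foldl aMeetStep m) := by
  induction results generalizing a c m with
  | nil => rfl
  | cons r rs ih => simp [List.foldl, aStep_eq, ih]

theorem items_foldl_aAth (rs : List (List (String × String)))
    (d : PySem.Dict (Option String × Option String) (List (String × String))) :
    (rs.foldl aAthStep d).items = (rs.filterMap athleteItem).foldl (ded (fun p => p.1)) d.items := by
  induction rs generalizing d with
  | nil => rfl
  | cons r rs ih =>
    simp only [List.foldl]
    by_cases h : truthy (rget r "name")
    · obtain ⟨v, hA⟩ : ∃ v, athleteItem r = some ((rget r "name", rget r "birth_date"), v) :=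
        ⟨_, by unfold athleteItem; rw [if_pos h]⟩
      rw [List.filterMap_cons_some hA, ih]
      have hstep : (aAthStep d r).items
          = ded (fun p => p.1) d.items ((rget r "name", rget r "birth_date"), v) := by
        have hct : d.contains (rget r "name", rget r "birth_date")
            = d.items.any (fun q => q.1 == (rget r "name", rget r "birth_date")) := by
          simp [PySem.Dict.contains]
        by_cases hc : d.contains (rget r "name", rget r "birth_date") = true
        · have hs : aAthStep d r = d := by simp [aAthStep, hc]
          rw [hs]
          simp [ded, ← hct, hc]
        · have hs : aAthStep d r
              = d.insert (rget r "name", rget r "birth_date") v := by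
            simp [aAthStep, h, hc, hA]
          rw [hs, PySem.Dict.items_insert_of_not_contains _ _ (by simpa using hc)]
          simp [ded, ← hct, hc]
      rw [hstep]
      rfl
    · have hA : athleteItem r = none := by simp [athleteItem, h]
      have hs : aAthStep d r = d := by simp [aAthStep, h]
      rw [List.filterMap_cons_none hA, hs, ih]

theorem items_foldl_aMeet (rs : List (List (String × String)))
    (d : PySem.Dict (Option String × Option String × Option String) (List (String × String))) :
    (rs.foldl aMeetStep d).items = (rs.filterMap meetItem).foldl (ded (fun p => p.1)) d.items := by
  induction rs generalizing d with
  | nil => rfl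
  | cons r rs ih =>
    simp only [List.foldl]
    by_cases h : truthy (rget r "meet_name")
    · obtain ⟨v, hA⟩ : ∃ v, meetItem r = some ((rget r "meet_name", rget r "date", rget r "city"), v) :=
        ⟨_, by unfold meetItem; rw [if_pos h]⟩
      rw [List.filterMap_cons_some hA, ih]
      have hstep : (aMeetStep d r).items
          = ded (fun p => p.1) d.items ((rget r "meet_name", rget r "date", rget r "city"), v) := by
        have hct : d.contains (rget r "meet_name", rget r "date", rget r "city")
            = d.items.any (fun q => q.1 == (rget r "meet_name", rget r "date", rget r "city")) := by
          simp [PySem.Dict.contains]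
        by_cases hc : d.contains (rget r "meet_name", rget r "date", rget r "city") = true
        · have hs : aMeetStep d r = d := by simp [aMeetStep, hc]
          rw [hs]
          simp [ded, ← hct, hc]
        · have hs : aMeetStep d r
              = d.insert (rget r "meet_name", rget r "date", rget r "city") v := by
            simp [aMeetStep, h, hc, hA]
          rw [hs, PySem.Dict.items_insert_of_not_contains _ _ (by simpa using hc)]
          simp [ded, ← hct, hc]
      rw [hstep]
      rfl
    · have hA : meetItem r = none := by simp [meetItem, h]
      have hs : aMeetStep d r = d := by simp [aMeetStep, h]
      rw [List.filterMap_cons_none hA, hs, ih]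

theorem clubs_foldl (rs : List (List (String × String))) (c : PySem.Set String) :
    rs.foldl cStep c = (rs.filterMap clubContrib).foldl (ded (fun x => x)) c := by
  induction rs generalizing c with
  | nil => rfl
  | cons r rs ih =>
    simp only [List.foldl, List.filterMap_cons]
    by_cases h : truthy (rget r "club")
    · have : cStep c r = ded (fun x => x) c ((rget r "club").getD "") := by
        simp [cStep, h, ded, PySem.Set.add, PySem.Set.contains_eq_listContains]
      rw [this, ih]
      simp [clubContrib, h]
    · have : cStep c r = c := by simp [cStep, h]
      rw [this, ih]
      simp [clubContrib, h]

-- B's divide and conquer computes exactly the from-scratch ded-folds of the contributions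
theorem gather_eq (rs : List (List (String × String))) :
    gather rs = ((rs.filterMap athleteItem).foldl (ded (fun p => p.1)) [],
                 (rs.filterMap clubContrib).foldl (ded (fun x => x)) [],
                 (rs.filterMap meetItem).foldl (ded (fun p => p.1)) []) := by
  induction rs using gather.induct with
  | case1 => simp [gather]
  | case2 r =>
    refine Prod.ext ?_ (Prod.ext ?_ ?_)
    · cases h : athleteItem r <;> simp [gather, h, List.foldl, ded]
    · by_cases h : truthy (rget r "club") <;> simp [gather, clubContrib, h, List.foldl, ded]
    · cases h : meetItem r <;> simp [gather, h, List.foldl, ded]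
  | case3 r₁ r₂ rest l mid ihl ihr =>
    simp only [gather]
    rw [ihl, ihr]
    have hsplit : (r₁ :: r₂ :: rest) =
        (r₁ :: r₂ :: rest).take ((r₁ :: r₂ :: rest).length / 2)
          ++ (r₁ :: r₂ :: rest).drop ((r₁ :: r₂ :: rest).length / 2) :=
      (List.take_append_drop _ _).symm
    conv_rhs => rw [hsplit]
    simp only [List.filterMap_append]
    rw [ded_append, ded_append, ded_append]

-- ===== VERDICT (by name: the statement is the Claim_ definition above) =====
theorem extract_unique_entities_spec : Claim_equal_extract_unique_entities := by
  intro results _ _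
  unfold Spec_extract_unique_entities extract_unique_entities extract_unique_entities_alt
  rw [foldA_eq, gather_eq]
  have hath : (results.foldl aAthStep PySem.Dict.empty).values
      = ((results.filterMap athleteItem).foldl (ded (fun p => p.1)) []).map (fun p => p.2) := by
    have := items_foldl_aAth results PySem.Dict.empty
    simp only [PySem.Dict.values, this]
    rfl
  have hmeet : (results.foldl aMeetStep PySem.Dict.empty).values
      = ((results.filterMap meetItem).foldl (ded (fun p => p.1)) []).map (fun p => p.2) := by
    have := items_foldl_aMeet results PySem.Dict.empty
    simp only [PySem.Dict.values, this]
    rfl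
  have hclub : (results.foldl cStep ([] : List String))
      = (results.filterMap clubContrib).foldl (ded (fun x => x)) [] := by
    simpa using clubs_foldl results []
  simp [hath, hmeet, hclub]
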